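-- pv_equiv track=rewrite | github.com/Djet78/Codewars_tasks | rotate_max.py | max_rot
-- ===== SOURCE A (Python) =====
-- from collections import deque
--
-- def max_rot(n):
--     """
--     Take a number: 56789. Rotate left, you get 67895.
--
--     Keep the first digit in place and rotate left the other digits: 68957.
--
--     Keep the first two digits in place and rotate the other ones: 68579.
--
--     Keep the first three digits and rotate left the rest: 68597. Now it is over since keeping the first four it remains
--     only one digit which rotated is itself.
--
--     You have the following sequence of numbers:
--
--     56789 -> 67895 -> 68957 -> 68579 -> 68597
--
--     and you must return the greatest: 68957.
--
--     >>> max_rot(56789)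
--     68957
--
--     >>> max_rot(38458215)
--     85821534
--
--     >>> max_rot(1)
--     1
--
--     >>> max_rot(10)
--     10
--
--     >>> max_rot(121)
--     211
--     """
--     rotations = [n]
--     n = str(n)
--     head = deque()
--     tail = deque(n)
--     for _ in range(len(n) - 1):
--         tail.rotate(-1)
--         head.append(tail.popleft())
--         rotations.append(int("".join(head + tail)))
--     return max(rotations)
-- ===== SOURCE B (Python) =====
-- def max_rot(n):
--     # Batch construction: each "keep prefix, rotate rest" pass is a perfect
--     # riffle of the unfixed suffix, so a whole run of successive rotations is
--     # read off the CURRENT string at once with odd/even strided slices.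
--     s = str(n)
--     best = n
--     i = 0
--     while len(s) - i >= 2:
--         u = s[i:]
--         odds, evens = u[1::2], u[0::2]
--         for t in range(1, len(evens) + 1):
--             s = s[:i] + odds[:t] + u[2 * t:] + evens[:t]
--             best = max(best, int(s))
--         i += len(evens)
--     return best
-- ===== Notes on version B (the rewrite author's own statement) =====
-- stated objective: alternative
-- what changed: B exploits that a run of successive keep-prefix rotations is a perfect riffle of the unfixed suffix, so it reads whole batches of rotations directly off the current string with odd/even strided slices (O(log d) outer passes), instead of A's digit-by-digit deque transfer building a rotations list and a final max().
import Mathlib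
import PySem

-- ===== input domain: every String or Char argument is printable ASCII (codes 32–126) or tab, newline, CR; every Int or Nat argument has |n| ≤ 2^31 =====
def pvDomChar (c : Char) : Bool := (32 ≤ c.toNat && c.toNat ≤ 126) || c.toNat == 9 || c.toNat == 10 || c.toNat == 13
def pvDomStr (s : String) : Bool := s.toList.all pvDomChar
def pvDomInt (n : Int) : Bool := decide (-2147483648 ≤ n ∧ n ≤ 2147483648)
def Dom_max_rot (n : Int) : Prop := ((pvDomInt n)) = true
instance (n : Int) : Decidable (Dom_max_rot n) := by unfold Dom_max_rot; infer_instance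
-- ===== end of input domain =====

-- B reads whole batches of successive keep-prefix rotations off the current string at
-- once via odd/even (riffle) strided slices, instead of A's per-digit deque transfer
-- building a rotations list; objective: alternative algorithm, same cost.


-- ===== PORT A =====
-- deque.rotate(-1): first element moves to the back (no-op on the empty deque)
def rotTailA (tail : List Char) : List Char :=
  match tail with
  | [] => []
  | c :: cs => cs ++ [c]

-- the for-loop over range(len(n)-1): state = (rotations, head, tail);
-- none = the iteration raised (popleft on empty deque / int() ValueError)
def rotStepsA : Nat → List Int → List Char → List Char → Option (List Int × List Char × List Char)
  | 0, rotations, head, tail => some (rotations, head, tail)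
  | fuel + 1, rotations, head, tail =>
    match rotTailA tail with
    | [] => none            -- tail.popleft(): IndexError
    | c :: cs =>            -- head.append(c); remaining tail = cs
      match PySem.Int.ofChars? ((head ++ [c]) ++ cs) with   -- int("".join(head + tail))
      | none => none        -- int(): ValueError
      | some v => rotStepsA fuel (rotations ++ [v]) (head ++ [c]) cs

def max_rot (n : Int) : Int :=
  let s := PySem.Int.toChars n
  match rotStepsA (s.length - 1) [n] [] s with
  | none => 0               -- unreachable junk: the Python raised (excluded by Pre_)
  | some (rotations, _, _) =>
    match PySem.List.max? rotations (fun v => v) with   -- max(rotations)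
    | none => 0             -- max([]) never happens: rotations starts as [n]
    | some m => m

-- ===== PORT B =====
-- the inner for-loop over range(1, len(evens) + 1): state = (s, best), counter t,
-- fuel = remaining iterations; none = int() raised (ValueError)
def innerB (i : Nat) (u odds evens : List Char) :
    Nat → Nat → List Char → Int → Option (List Char × Int)
  | _, 0, s, best => some (s, best)
  | t, fuel + 1, s, best =>
    -- s = s[:i] + odds[:t] + u[2*t:] + evens[:t]
    let s' := PySem.List.slice s none (some (i : Int)) ++
              PySem.List.slice odds none (some (t : Int)) ++
              PySem.List.slice u (some ((2 * t : Nat) : Int)) none ++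
              PySem.List.slice evens none (some (t : Int))
    match PySem.Int.ofChars? s' with   -- int(s)
    | none => none
    | some v => innerB i u odds evens (t + 1) fuel s' (max best v)

-- the while-loop: state = (i, s, best); fuel ≥ len(s) - i bounds the iteration count
-- (i grows by len(evens) ≥ 1 each pass), so the fuel-0 branch is never reached.
-- In every reachable state i ≤ len(s), so Nat subtraction matches Python's len(s) - i.
def outerB : Nat → Nat → List Char → Int → Option Int
  | 0, _, _, best => some best
  | fuel + 1, i, s, best =>
    if 2 ≤ s.length - i then
      let u := PySem.List.slice s (some (i : Int)) none         -- u = s[i:]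
      let odds := (PySem.List.slice? u (some 1) none 2).getD []  -- odds = u[1::2]
      let evens := (PySem.List.slice? u (some 0) none 2).getD [] -- evens = u[0::2]
      match innerB i u odds evens 1 evens.length s best with
      | none => none
      | some (s', best') => outerB fuel (i + evens.length) s' best'
    else some best

def max_rot_alt (n : Int) : Int :=
  let s := PySem.Int.toChars n
  match outerB s.length 0 s n with
  | none => 0               -- unreachable junk: the Python raised (excluded by Pre_)
  | some best => best

-- ===== PRECONDITION & SPEC =====
-- A raises ValueError for negative n (the '-' sign ends up inside a rotated digit
-- string handed to int()), so negative inputs are excluded.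
def Pre_max_rot (n : Int) : Prop := 0 ≤ n
instance (n : Int) : Decidable (Pre_max_rot n) := by unfold Pre_max_rot; infer_instance
def pvWitness_max_rot : Int := (56789)

def Spec_max_rot (n : Int) (out : Int) : Prop := out = max_rot_alt n
instance (n : Int) (out : Int) : Decidable (Spec_max_rot n out) := by unfold Spec_max_rot; infer_instance

-- ===== CLAIM (what is proved, stated in full; the proofs are below) =====
def Claim_equal_max_rot : Prop := ∀ (n : Int), Dom_max_rot n → Pre_max_rot n → Spec_max_rot n (max_rot n)

-- ===== LEMMAS AND PROOFS =====

-- every second element of a list (u[0::2])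
def everyOther {α : Type} : List α → List α
  | [] => []
  | [a] => [a]
  | a :: _ :: rest => a :: everyOther rest

lemma everyOther_cons {α : Type} (b : α) (l : List α) :
    everyOther (b :: l) = b :: everyOther l.tail := by
  cases l <;> rfl

lemma length_everyOther {α : Type} : ∀ (u : List α),
    (everyOther u).length = (u.length + 1) / 2 := by
  intro u
  induction u using everyOther.induct with
  | case1 => simp [everyOther]
  | case2 a => simp [everyOther]
  | case3 a b rest ih => simp [everyOther, ih]; omega

-- u[0::2] and u[1::2] as everyOther

lemma fm_zero {α : Type} : ∀ (u : List α),
    List.filterMap (fun k => u[2 * k]?) (List.range ((u.length + 1) / 2)) = everyOther u := by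
  intro u
  induction u using everyOther.induct with
  | case1 => simp [everyOther]
  | case2 a => simp [everyOther, List.range_succ]
  | case3 a b rest ih =>
    have hlen : ((a :: b :: rest).length + 1) / 2 = (rest.length + 1) / 2 + 1 := by
      simp; omega
    rw [hlen, List.range_succ_eq_map, List.filterMap_cons, List.filterMap_map]
    simp only [Nat.mul_zero, List.getElem?_cons_zero, everyOther]
    congr 1

lemma fm_one {α : Type} : ∀ (u : List α),
    List.filterMap (fun k => u[2 * k + 1]?) (List.range (u.length / 2)) = everyOther u.tail := by
  intro u
  induction u using everyOther.induct with
  | case1 => simp [everyOther]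
  | case2 a => simp [everyOther]
  | case3 a b rest ih =>
    have hlen : (a :: b :: rest).length / 2 = rest.length / 2 + 1 := by simp; omega
    rw [hlen, List.range_succ_eq_map, List.filterMap_cons, List.filterMap_map]
    simp only [Nat.mul_zero, List.getElem?_cons_succ, List.getElem?_cons_zero, List.tail_cons]
    have htail : everyOther (b :: rest) = b :: everyOther rest.tail := by
      cases rest <;> rfl
    rw [htail]
    congr 1

lemma slice?_two_zero {α : Type} (u : List α) :
    PySem.List.slice? u (some 0) none 2 = some (everyOther u) := by
  simp only [PySem.List.slice?, PySem.List.sliceIndices]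
  norm_num
  rw [← fm_zero u]
  have hc : ((↑u.length + (2:ℤ) - 1) / 2).toNat = (u.length + 1) / 2 := by
    rw [show ((u.length:Int) + 2 - 1) = ((u.length + 1 : Nat) : Int) by push_cast; ring,
      show ((u.length + 1 : Nat) : Int) / 2 = (((u.length + 1) / 2 : Nat) : Int) from
        Eq.symm (Nat.ToInt.div_congr rfl rfl)]
    exact Int.toNat_natCast _
  by_cases h : 0 < u.length
  · rw [if_pos h, hc]
    apply List.filterMap_congr
    intro k _
    congr 1
  · rw [if_neg h, show (u.length + 1) / 2 = 0 by omega]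
    simp

lemma slice?_two_one {α : Type} (u : List α) :
    PySem.List.slice? u (some 1) none 2 = some (everyOther u.tail) := by
  simp only [PySem.List.slice?, PySem.List.sliceIndices]
  norm_num
  rw [← fm_one u]
  by_cases h : 1 < u.length
  · have hmin : min (1:ℤ) (u.length:Int) = 1 := by omega
    rw [hmin, if_pos h]
    have hc : (((u.length:Int) - 1 + 2 - 1) / 2).toNat = u.length / 2 := by
      rw [show ((u.length:Int) - 1 + 2 - 1) = ((u.length : Nat) : Int) by ring,
        show ((u.length : Nat) : Int) / 2 = ((u.length / 2 : Nat) : Int) from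
          Eq.symm (Nat.ToInt.div_congr rfl rfl)]
      exact Int.toNat_natCast _
    rw [hc]
    apply List.filterMap_congr
    intro k _
    congr 1
    omega
  · rw [if_neg h, show u.length / 2 = 0 by omega]
    simp

-- Python's max() of a nonempty int list is the left fold of binary max.
lemma max?_cons : ∀ (xs : List Int) (r : Int),
    PySem.List.max? (r :: xs) (fun v => v) = some (List.foldl max r xs) := by
  intro xs
  induction xs with
  | nil => intro r; rfl
  | cons x xs ih =>
    intro r
    have h1 : PySem.List.max? (r :: x :: xs) (fun v : Int => v)
        = PySem.List.max? (max r x :: xs) (fun v : Int => v) := by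
      simp only [PySem.List.max?, List.foldl]
      congr 1
      rcases lt_or_ge r x with h | h
      · rw [if_pos (by simpa using h), max_eq_right h.le]
      · rw [if_neg (by simpa using not_lt.mpr h), max_eq_left h]
    rw [h1, ih]
    simp [List.foldl]

-- A's flat loop splits into two consecutive runs.
lemma rotStepsA_add (a b : Nat) : ∀ (rot : List Int) (head tail : List Char),
    rotStepsA (a + b) rot head tail
    = match rotStepsA a rot head tail with
      | none => none
      | some (rot', h', t') => rotStepsA b rot' h' t' := by
  induction a with
  | zero => intro rot head tail; simp [rotStepsA]
  | succ a ih =>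
    intro rot head tail
    rw [Nat.succ_add]
    simp only [rotStepsA]
    cases rotTailA tail with
    | nil => rfl
    | cons c cs =>
      simp only []
      cases PySem.Int.ofChars? ((head ++ [c]) ++ cs) with
      | none => rfl
      | some v => exact ih _ _ _

-- one batch: A's next run of steps produces exactly B's inner-loop strings
lemma inner_eq (i : Nat) (head0 u odds evens : List Char) (hh : head0.length = i) :
    ∀ (r : Nat) (o e w : List Char) (rot : List Int) (best : Int),
      o.length = e.length →
      odds = o ++ everyOther w.tail →
      evens = e ++ everyOther w →
      u.drop (2 * e.length) = w →
      r + e.length = evens.length →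
      (rotStepsA r rot (head0 ++ o) (w ++ e) = none ∧
        innerB i u odds evens (e.length + 1) r (head0 ++ o ++ w ++ e) best = none) ∨
      (∃ vs h' tl', rotStepsA r rot (head0 ++ o) (w ++ e) = some (rot ++ vs, h', tl') ∧
        h'.length = i + evens.length ∧
        tl'.length + r = w.length + e.length ∧
        innerB i u odds evens (e.length + 1) r (head0 ++ o ++ w ++ e) best
          = some (h' ++ tl', List.foldl max best vs)) := by
  intro r
  induction r with
  | zero =>
    intro o e w rot best he ho hev hu hr
    right
    refine ⟨[], head0 ++ o, w ++ e, by simp [rotStepsA], ?_, by simp, by simp [innerB, List.append_assoc]⟩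
    simp [hh, he, ← hr]
  | succ r' ih =>
    intro o e w rot best he ho hev hu hr
    match w with
    | [] =>
      exfalso
      have : evens.length = e.length := by simp [hev, show everyOther ([] : List Char) = [] from rfl]
      omega
    | [a] =>
      have hlev : evens.length = e.length + 1 := by
        simp [hev, show everyOther [a] = [a] from rfl]
      have hr0 : r' = 0 := by omega
      subst hr0
      -- the final (odd-length) step of the batch
      have hodds : odds = o := by
        rw [ho, show everyOther ([a].tail) = [] from rfl, List.append_nil]
      have htake_odds : PySem.List.slice odds none (some ((e.length + 1 : Nat) : Int)) = o := by
        rw [PySem.List.slice_to_natCast, hodds]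
        exact List.take_of_length_le (by omega)
      have htake_evens : PySem.List.slice evens none (some ((e.length + 1 : Nat) : Int)) = e ++ [a] := by
        rw [PySem.List.slice_to_natCast, hev, show everyOther [a] = [a] from rfl]
        exact List.take_of_length_le (by simp)
      have hdrop_u : PySem.List.slice u (some ((2 * (e.length + 1) : Nat) : Int)) none = [] := by
        rw [PySem.List.slice_from_natCast, show 2 * (e.length + 1) = 2 * e.length + 2 by ring,
          ← List.drop_drop, hu]
        rfl
      have htake_s : PySem.List.slice (head0 ++ o ++ [a] ++ e) none (some (i : Int)) = head0 := by
        rw [PySem.List.slice_to_natCast, List.append_assoc, List.append_assoc]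
        exact List.take_left' hh
      simp only [rotStepsA, rotTailA, innerB, htake_odds, htake_evens, hdrop_u, htake_s]
      match e, he, hlev with
      | [], he, hlev =>
        have ho0 : o = [] := by cases o <;> simp_all
        subst ho0
        simp only [List.singleton_append, List.cons_append, List.nil_append, List.append_nil,
          List.append_assoc]
        cases hof : PySem.Int.ofChars? (head0 ++ [a]) with
        | none => exact Or.inl ⟨by simp [hof], by simp [hof]⟩
        | some v =>
          right
          refine ⟨[v], head0 ++ [a], [], by simp [rotStepsA, hof], by simp [hh, hlev], by simp,
            by simp [innerB, hof]⟩
      | x :: e', he, hlev =>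
        simp only [List.singleton_append, List.cons_append, List.nil_append, List.append_nil,
          List.append_assoc]
        cases hof : PySem.Int.ofChars? (head0 ++ (o ++ (x :: (e' ++ [a])))) with
        | none => exact Or.inl ⟨by simp [hof], by simp [hof]⟩
        | some v =>
          right
          refine ⟨[v], head0 ++ (o ++ [x]), e' ++ [a], ?_, ?_, ?_, ?_⟩
          · simp [rotStepsA, hof]
          · simp only [List.length_append, List.length_cons] at he hlev ⊢
            simp [hh]
            omega
          · simp only [List.length_append, List.length_cons] at he ⊢
            omega
          · simp [innerB, hof]
    | a :: b :: w'' =>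
      -- a middle step of the batch
      have htake_odds : PySem.List.slice odds none (some ((e.length + 1 : Nat) : Int)) = o ++ [b] := by
        rw [PySem.List.slice_to_natCast, ho,
          show (a :: b :: w'' : List Char).tail = b :: w'' from rfl, everyOther_cons,
          List.take_append, List.take_of_length_le (by omega),
          show e.length + 1 - o.length = 1 by omega]
        simp
      have htake_evens : PySem.List.slice evens none (some ((e.length + 1 : Nat) : Int)) = e ++ [a] := by
        rw [PySem.List.slice_to_natCast, hev,
          show everyOther (a :: b :: w'') = a :: everyOther w'' from rfl,
          List.take_append, List.take_of_length_le (by omega),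
          show e.length + 1 - e.length = 1 by omega]
        simp
      have hu2 : u.drop (2 * ((e ++ [a]).length)) = w'' := by
        simp only [List.length_append, List.length_cons, List.length_nil]
        rw [show 2 * (e.length + (0 + 1)) = 2 * e.length + 2 by ring, ← List.drop_drop, hu]
        rfl
      have hdrop_u : PySem.List.slice u (some ((2 * (e.length + 1) : Nat) : Int)) none = w'' := by
        rw [PySem.List.slice_from_natCast, show 2 * (e.length + 1) = 2 * e.length + 2 by ring,
          ← List.drop_drop, hu]
        rfl
      have htake_s : PySem.List.slice (head0 ++ o ++ (a :: b :: w'') ++ e) none (some (i : Int)) = head0 := by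
        rw [PySem.List.slice_to_natCast, List.append_assoc, List.append_assoc]
        exact List.take_left' hh
      simp only [rotStepsA, rotTailA, innerB, htake_odds, htake_evens, hdrop_u, htake_s]
      simp only [List.singleton_append, List.cons_append, List.nil_append, List.append_nil,
        List.append_assoc]
      cases hof : PySem.Int.ofChars? (head0 ++ (o ++ (b :: (w'' ++ (e ++ [a]))))) with
      | none => exact Or.inl ⟨by simp [hof], by simp [hof]⟩
      | some v =>
        simp only [hof]
        have H := ih (o ++ [b]) (e ++ [a]) w'' (rot ++ [v]) (max best v)
          (by simp [he]) (by rw [ho, List.tail_cons, everyOther_cons]; simp)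
          (by rw [hev, show everyOther (a :: b :: w'') = a :: everyOther w'' from rfl]; simp)
          hu2 (by simp only [List.length_append, List.length_cons, List.length_nil] at hr ⊢; omega)
        simp only [List.singleton_append, List.cons_append, List.nil_append, List.append_nil,
          List.append_assoc, List.length_append, List.length_cons, List.length_nil] at H
        rcases H with ⟨H1, H2⟩ | ⟨vs, h', tl', H1, H2, H3, H4⟩
        · exact Or.inl ⟨by rw [← H1], by rw [← H2]⟩
        · right
          refine ⟨v :: vs, h', tl', ?_, H2, ?_, ?_⟩
          · exact H1
          · simp only [List.length_cons]
            omega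
          · rw [List.foldl_cons]
            exact H4

-- the whole computation: A's flat loop + final max() equals B's nested loops
lemma outer_eq : ∀ (fuel : Nat) (head tail : List Char) (b0 : Int) (acc : List Int),
    tail.length ≤ fuel →
    (match rotStepsA (tail.length - 1) (b0 :: acc) head tail with
     | none => (0 : Int)
     | some (r, _, _) =>
       match PySem.List.max? r (fun v => v) with
       | none => 0
       | some m => m)
    = (match outerB fuel head.length (head ++ tail) (List.foldl max b0 acc) with
       | none => 0
       | some b => b) := by
  intro fuel
  induction fuel with
  | zero =>
    intro head tail b0 acc hle
    have ht : tail = [] := List.eq_nil_of_length_eq_zero (by omega)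
    subst ht
    simp [rotStepsA, outerB, max?_cons]
  | succ fuel ih =>
    intro head tail b0 acc hle
    by_cases h2 : 2 ≤ tail.length
    · have hguard : 2 ≤ (head ++ tail).length - head.length := by
        simp [List.length_append]; omega
      have hu : PySem.List.slice (head ++ tail) (some ((head.length : Nat) : Int)) none = tail := by
        rw [PySem.List.slice_from_natCast, List.drop_left]
      simp only [outerB, if_pos hguard, hu, slice?_two_zero, slice?_two_one, Option.getD_some]
      set k := (everyOther tail).length with hk
      have hk2 : k = (tail.length + 1) / 2 := by rw [hk, length_everyOther]
      have hkle : k ≤ tail.length - 1 := by omega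
      have H := inner_eq head.length head tail (everyOther tail.tail) (everyOther tail) rfl
        k [] [] tail (b0 :: acc) (List.foldl max b0 acc) rfl (by simp) (by simp) (by simp) (by simp [hk])
      simp only [List.nil_append, List.append_nil, List.length_nil] at H
      rw [show tail.length - 1 = k + (tail.length - 1 - k) by omega, rotStepsA_add]
      rcases H with ⟨H1, H2⟩ | ⟨vs, h', tl', H1, H2, H3, H4⟩
      · rw [H1, H2]
      · rw [H1, H4]
        have htl : tl'.length = tail.length - k := by omega
        have hone : 1 ≤ k := by omega
        have hrest : tail.length - 1 - k = tl'.length - 1 := by omega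
        have hfold : List.foldl max b0 (acc ++ vs)
            = List.foldl max (List.foldl max b0 acc) vs := List.foldl_append
        have hihm := ih h' tl' b0 (acc ++ vs) (by omega)
        rw [hrest, show (b0 :: acc) ++ vs = b0 :: (acc ++ vs) by simp, ← hfold, ← H2]
        exact hihm
    · have hguard : ¬ 2 ≤ (head ++ tail).length - head.length := by
        simp [List.length_append]; omega
      have ht : tail.length - 1 = 0 := by omega
      rw [ht]
      simp [rotStepsA, outerB, if_neg hguard, max?_cons, h2]

-- ===== VERDICT (by name: the statement is the Claim_ definition above) =====
theorem max_rot_spec : Claim_equal_max_rot := by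
  intro n _ _
  unfold Spec_max_rot
  have h := outer_eq (PySem.Int.toChars n).length [] (PySem.Int.toChars n) n [] (le_refl _)
  simpa [max_rot, max_rot_alt] using h
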